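-- pv_equiv track=rewrite | github.com/giahy2507/interview | interview2_1.py | adjust_index
-- ===== SOURCE A (Python) =====
-- from copy import deepcopy
--
-- def adjust_index(categories, min_df = 3):
--     """
--     Indexing product_id, category_id for vectorizing
--     Params:
--         categories: object from read_data()
--         min_df: minimum frequency
--     Returns:
--         result: (list(4)): categories information, each element is an dictionary[<category_id>:<feature_id>]
--         counter: number of features
--     """
--     result = deepcopy(categories)
--     counter = 24 # the first 24 indexes for 24 hours
--     for i in range(len(categories)):
--         for key, value in categories[i].items():
--             if value < min_df:
--                 continue
--             result[i][key] = counter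
--             counter+=1
--     return result, counter
-- ===== SOURCE B (Python) =====
-- def adjust_index(categories, min_df = 3):
--     # Prefix-sum decomposition: compute each dictionary's starting feature
--     # offset from the per-dictionary counts of frequent keys, then rebuild
--     # every dictionary independently from its own offset.  No deepcopy, no
--     # in-place mutation, no running counter shared across dictionaries.
--     counts = [sum(1 for v in d.values() if v >= min_df) for d in categories]
--     offsets = [24]
--     for c in counts:
--         offsets.append(offsets[-1] + c)
--
--     def rebuild(d, base):
--         new = {}
--         j = base
--         for k, v in d.items():
--             if v >= min_df:
--                 new[k] = j
--                 j += 1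
--             else:
--                 new[k] = v
--         return new
--
--     result = [rebuild(d, base) for d, base in zip(categories, offsets)]
--     return result, offsets[-1]
-- ===== Notes on version B (the rewrite author's own statement) =====
-- stated objective: alternative
-- what changed: B abandons A's deepcopy-and-mutate pass with one global running counter: it computes per-dictionary frequent-key counts, turns them into starting offsets by a prefix sum, and then rebuilds each dictionary independently from its own offset, returning fresh dictionaries; Pre_ only states the dict representation invariant (distinct keys inside each association list), which every real Python dict input satisfies.
import Mathlib
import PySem

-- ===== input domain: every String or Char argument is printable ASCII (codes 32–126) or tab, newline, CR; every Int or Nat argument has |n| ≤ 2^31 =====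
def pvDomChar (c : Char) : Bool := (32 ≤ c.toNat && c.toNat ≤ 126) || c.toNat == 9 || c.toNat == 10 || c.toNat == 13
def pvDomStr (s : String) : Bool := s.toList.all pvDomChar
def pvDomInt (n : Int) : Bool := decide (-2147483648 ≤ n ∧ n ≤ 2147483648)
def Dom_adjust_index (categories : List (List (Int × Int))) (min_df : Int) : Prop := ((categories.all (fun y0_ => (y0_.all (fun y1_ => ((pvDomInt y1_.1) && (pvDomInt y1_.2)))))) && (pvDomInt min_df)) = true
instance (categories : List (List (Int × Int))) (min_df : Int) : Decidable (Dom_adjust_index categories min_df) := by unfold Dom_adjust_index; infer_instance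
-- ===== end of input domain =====

-- B replaces A's deepcopy-and-mutate pass with a global counter by a prefix-sum
-- decomposition (per-dict counts → offsets → independent rebuild of each dict);
-- same cost, proved equal on dict-shaped inputs (distinct keys per inner list).

-- ===== PORT A =====
-- deepcopy is the identity on pure values; `range(len(categories))` indices are always
-- in range, so `categories[i]` / `result[i]` are ported with pyGetD/pySetD (exact here).
-- `result[i][key] = counter` is a dict overwrite: it keeps the key's position.
def pvDictSet (res : List (List (Int × Int))) (i : Int) (k v : Int) : List (List (Int × Int)) :=
  PySem.List.pySetD res i ((PySem.Dict.insert (PySem.Dict.mk (PySem.List.pyGetD res i [])) k v).items)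

def adjust_index (categories : List (List (Int × Int))) (min_df : Int) : (List (List (Int × Int))) × Int :=
  (PySem.List.pyRange 0 (categories.length : Int) 1).foldl
    (fun st i =>
      (PySem.List.pyGetD categories i []).foldl
        (fun st kv =>
          if kv.2 < min_df then st
          else (pvDictSet st.1 i kv.1 st.2, st.2 + 1))
        st)
    (categories, 24)

-- ===== PORT B =====
-- Source B's helper `rebuild(d, base)`: returns (new dict, next free index).  `new` only
-- ever receives fresh keys (the keys of `d`, distinct under Pre_), so `new[k] = v`
-- is ported as appending the pair.
def pvRebuild (min_df : Int) (d : List (Int × Int)) (base : Int) : (List (Int × Int)) × Int :=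
  d.foldl
    (fun st kv =>
      if min_df ≤ kv.2 then (st.1 ++ [(kv.1, st.2)], st.2 + 1)
      else (st.1 ++ [(kv.1, kv.2)], st.2))
    ([], base)

def adjust_index_alt (categories : List (List (Int × Int))) (min_df : Int) : (List (List (Int × Int))) × Int :=
  let counts := categories.map
      (fun d => d.foldl (fun s kv => if min_df ≤ kv.2 then s + 1 else s) (0 : Int))
  let offsets := counts.foldl (fun offs c => offs ++ [offs.getLastD 24 + c]) [24]
  let result := (categories.zip offsets).map (fun p => (pvRebuild min_df p.1 p.2).1)
  (result, offsets.getLastD 24)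

-- ===== PRECONDITION & SPEC =====
-- Pre_ is the Python dict representation invariant: each inner association list has
-- pairwise-distinct keys (a Python dict cannot hold duplicate keys, so this excludes
-- no input the Python function can actually receive).
def Pre_adjust_index (categories : List (List (Int × Int))) (min_df : Int) : Prop :=
  ∀ d ∈ categories, (d.map Prod.fst).Nodup
instance (categories : List (List (Int × Int))) (min_df : Int) : Decidable (Pre_adjust_index categories min_df) := by unfold Pre_adjust_index; infer_instance

def pvWitness_adjust_index : (List (List (Int × Int))) × Int :=
  ([[(1, 5), (2, 1)], [], [(3, 4), (7, 0)]], 3)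

def Spec_adjust_index (categories : List (List (Int × Int))) (min_df : Int) (out : (List (List (Int × Int))) × Int) : Prop := out = adjust_index_alt categories min_df
instance (categories : List (List (Int × Int))) (min_df : Int) (out : (List (List (Int × Int))) × Int) : Decidable (Spec_adjust_index categories min_df out) := by unfold Spec_adjust_index; infer_instance

-- ===== CLAIM (what is proved, stated in full; the proofs are below) =====
def Claim_equal_adjust_index : Prop := ∀ (categories : List (List (Int × Int))) (min_df : Int), Dom_adjust_index categories min_df → Pre_adjust_index categories min_df → Spec_adjust_index categories min_df (adjust_index categories min_df)

-- ===== LEMMAS AND PROOFS =====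

-- middle form: thread the rebuilds over the rows with a running counter
def pvAux (min_df : Int) : List (List (Int × Int)) → Int → (List (List (Int × Int))) × Int
  | [], c => ([], c)
  | d :: ds, c =>
      let rc := pvRebuild min_df d c
      let rest := pvAux min_df ds rc.2
      (rc.1 :: rest.1, rest.2)

-- the counters produced after each row (B's offsets list, minus the leading 24)
def pvSums (min_df : Int) : List (List (Int × Int)) → Int → List Int
  | [], _ => []
  | d :: ds, c =>
      let c' := d.foldl (fun s kv => if min_df ≤ kv.2 then s + 1 else s) c
      c' :: pvSums min_df ds c'

theorem pv_getMid (pre rest : List (List (Int × Int))) (r : List (Int × Int)) (d : List (Int × Int)) :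
    PySem.List.pyGetD (pre ++ r :: rest) ((pre.length : Nat) : Int) d = r := by
  simp [PySem.List.pyGetD_natCast, List.getD]

theorem pv_setMid (pre rest : List (List (Int × Int))) (r r' : List (Int × Int)) :
    PySem.List.pySetD (pre ++ r :: rest) ((pre.length : Nat) : Int) r' = pre ++ r' :: rest := by
  simp [PySem.List.pySetD_natCast, List.set_cons_zero]

theorem pv_rebuild_snd (min_df : Int) (d : List (Int × Int)) :
    ∀ (x : List (Int × Int)) (c : Int),
      (d.foldl (fun st kv =>
          if min_df ≤ kv.2 then (st.1 ++ [(kv.1, st.2)], st.2 + 1)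
          else (st.1 ++ [(kv.1, kv.2)], st.2)) (x, c)).2
        = d.foldl (fun s kv => if min_df ≤ kv.2 then s + 1 else s) c := by
  induction d with
  | nil => intro x c; rfl
  | cons kv t ih =>
      intro x c
      by_cases h : min_df ≤ kv.2 <;> simp [h, ih]

-- the in-place overwrite of one existing key is a positional replacement
theorem pv_replace (x t' : List (Int × Int)) (k v0 c : Int)
    (hx : ∀ p ∈ x, p.1 ≠ k) (ht : ∀ p ∈ t', p.1 ≠ k) :
    (x ++ (k, v0) :: t').map (fun p => if p.1 == k then (k, c) else p)
      = x ++ (k, c) :: t' := by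
  have gen : ∀ (l : List (Int × Int)), (∀ p ∈ l, p.1 ≠ k) →
      l.map (fun p => if p.1 == k then (k, c) else p) = l := by
    intro l
    induction l with
    | nil => intro _; rfl
    | cons a l ih =>
        intro hl
        rw [List.map_cons, ih (fun p hp => hl p (List.mem_cons_of_mem a hp))]
        simp [hl a (by simp)]
  rw [List.map_append, List.map_cons, gen x hx, gen t' ht]
  simp

-- one row of A: folding the overwrite over the (still original) row equals the rebuild
theorem pv_row (min_df : Int) (t : List (Int × Int)) :
    ∀ (x : List (Int × Int)) (pre rest : List (List (Int × Int))) (c : Int),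
      (((x ++ t).map Prod.fst).Nodup) →
      t.foldl (fun st kv =>
          if kv.2 < min_df then st
          else (pvDictSet st.1 ((pre.length : Nat) : Int) kv.1 st.2, st.2 + 1))
        (pre ++ (x ++ t) :: rest, c)
      = (pre ++ (t.foldl (fun st kv =>
            if min_df ≤ kv.2 then (st.1 ++ [(kv.1, st.2)], st.2 + 1)
            else (st.1 ++ [(kv.1, kv.2)], st.2)) (x, c)).1 :: rest,
         (t.foldl (fun st kv =>
            if min_df ≤ kv.2 then (st.1 ++ [(kv.1, st.2)], st.2 + 1)
            else (st.1 ++ [(kv.1, kv.2)], st.2)) (x, c)).2) := by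
  induction t with
  | nil => intro x pre rest c _; simp
  | cons kv t' ih =>
      obtain ⟨k, v⟩ := kv
      intro x pre rest c hnd
      by_cases h : v < min_df
      · -- infrequent: A skips, B copies the pair over
        simp only [List.foldl_cons, if_pos h, if_neg (not_le.mpr h)]
        have hxx : (x ++ [(k, v)]) ++ t' = x ++ (k, v) :: t' := by simp
        have hnd' : (((x ++ [(k, v)]) ++ t').map Prod.fst).Nodup := by rw [hxx]; exact hnd
        have := ih (x ++ [(k, v)]) pre rest c hnd'
        rw [hxx] at this
        exact this
      · -- frequent: the overwrite replaces the pair in place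
        have hv : min_df ≤ v := not_lt.mp h
        simp only [List.foldl_cons, if_neg h, if_pos hv]
        -- key disjointness facts from Nodup
        have hsplit : ((x ++ (k, v) :: t').map Prod.fst)
            = x.map Prod.fst ++ k :: t'.map Prod.fst := by simp
        rw [hsplit] at hnd
        have hkx : k ∉ x.map Prod.fst := fun hm =>
          (List.disjoint_of_nodup_append hnd) hm (by simp)
        have hkt : k ∉ t'.map Prod.fst := by
          have := (List.Nodup.of_append_right hnd)
          exact (List.nodup_cons.mp this).1
        have hx : ∀ p ∈ x, p.1 ≠ k := fun p hp he => hkx (he ▸ List.mem_map_of_mem hp)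
        have ht : ∀ p ∈ t', p.1 ≠ k := fun p hp he => hkt (he ▸ List.mem_map_of_mem hp)
        -- evaluate the overwrite
        have hcont : (PySem.Dict.mk (x ++ (k, v) :: t')).contains k = true := by
          rw [PySem.Dict.contains_iff_mem_keys]
          show k ∈ (x ++ (k, v) :: t').map Prod.fst
          simp
        have hstep : pvDictSet (pre ++ (x ++ (k, v) :: t') :: rest) ((pre.length : Nat) : Int) k c
            = pre ++ ((x ++ [(k, c)]) ++ t') :: rest := by
          unfold pvDictSet
          rw [pv_getMid, PySem.Dict.items_insert_of_contains _ _ hcont]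
          show PySem.List.pySetD _ _ ((x ++ (k, v) :: t').map _) = _
          rw [pv_replace x t' k v c hx ht, pv_setMid]
          simp
        rw [hstep]
        have hnd' : (((x ++ [(k, c)]) ++ t').map Prod.fst).Nodup := by
          have : ((x ++ [(k, c)]) ++ t').map Prod.fst
              = x.map Prod.fst ++ k :: t'.map Prod.fst := by simp
          rw [this]; exact hnd
        exact ih (x ++ [(k, c)]) pre rest (c + 1) hnd'

-- the whole of A's loop, rows already processed collected in `pre`
theorem pv_outer (min_df : Int) (cats : List (List (Int × Int))) :
    ∀ (pre : List (List (Int × Int))) (c : Int),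
      (∀ d ∈ cats, (d.map Prod.fst).Nodup) →
      (PySem.List.enumerate cats ((pre.length : Nat) : Int)).foldl
          (fun st p => p.2.foldl
            (fun st kv => if kv.2 < min_df then st
              else (pvDictSet st.1 p.1 kv.1 st.2, st.2 + 1)) st)
          (pre ++ cats, c)
        = (pre ++ (pvAux min_df cats c).1, (pvAux min_df cats c).2) := by
  induction cats with
  | nil => intro pre c _; simp [pvAux, PySem.List.enumerate]
  | cons d ds ih =>
      intro pre c hnd
      rw [PySem.List.enumerate_cons, List.foldl_cons]
      have hrow := pv_row min_df d [] pre ds c (by simpa using hnd d (by simp))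
      simp only [List.nil_append] at hrow
      rw [hrow]
      have hassoc : pre ++ (d.foldl (fun st kv =>
            if min_df ≤ kv.2 then (st.1 ++ [(kv.1, st.2)], st.2 + 1)
            else (st.1 ++ [(kv.1, kv.2)], st.2)) ([], c)).1 :: ds
          = (pre ++ [(pvRebuild min_df d c).1]) ++ ds := by
        simp [pvRebuild]
      have hlen : ((pre.length : Nat) : Int) + 1 = (((pre ++ [(pvRebuild min_df d c).1]).length : Nat) : Int) := by
        simp
      rw [hassoc, hlen, ih (pre ++ [(pvRebuild min_df d c).1]) _ (fun e he => hnd e (List.mem_cons_of_mem d he))]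
      simp [pvAux, pvRebuild]

theorem adjust_index_as_enumerate (categories : List (List (Int × Int))) (min_df : Int) :
    adjust_index categories min_df
      = (PySem.List.enumerate categories 0).foldl
          (fun st p => p.2.foldl
            (fun st kv => if kv.2 < min_df then st else (pvDictSet st.1 p.1 kv.1 st.2, st.2 + 1)) st)
          (categories, 24) := by
  rw [PySem.List.enumerate_eq_map_pyRange (d := ([] : List (Int × Int))), List.foldl_map]
  simp [adjust_index, PySem.List.len_eq]

-- B's offsets fold produces 24 followed by the running counters
theorem pv_offs (min_df : Int) (cats : List (List (Int × Int))) :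
    ∀ (pre : List Int) (c : Int),
      (cats.map (fun d => d.foldl (fun s kv => if min_df ≤ kv.2 then s + 1 else s) (0 : Int))).foldl
          (fun offs cnt => offs ++ [offs.getLastD 24 + cnt]) (pre ++ [c])
        = pre ++ c :: pvSums min_df cats c := by
  induction cats with
  | nil => intro pre c; simp [pvSums]
  | cons d ds ih =>
      intro pre c
      simp only [List.map_cons, List.foldl_cons, pvSums, List.getLastD_concat]
      have hcnt : ∀ a : Int, d.foldl (fun s kv => if min_df ≤ kv.2 then s + 1 else s) a
          = a + (d.countP (fun kv => decide (min_df ≤ kv.2)) : Int) := by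
        intro a
        have hc := PySem.List.foldl_count_if (fun kv : Int × Int => decide (min_df ≤ kv.2)) d a
        simp only [decide_eq_true_eq] at hc
        exact hc
      rw [hcnt 0, zero_add, hcnt c,
        ih (pre ++ [c]) (c + (d.countP (fun kv => decide (min_df ≤ kv.2)) : Int))]
      simp

theorem pv_zipmap (min_df : Int) (cats : List (List (Int × Int))) :
    ∀ (c : Int),
      (cats.zip (c :: pvSums min_df cats c)).map (fun p => (pvRebuild min_df p.1 p.2).1)
        = (pvAux min_df cats c).1 := by
  induction cats with
  | nil => intro c; rfl
  | cons d ds ih =>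
      intro c
      have hsnd : (pvRebuild min_df d c).2
          = d.foldl (fun s kv => if min_df ≤ kv.2 then s + 1 else s) c :=
        pv_rebuild_snd min_df d [] c
      simp only [pvSums, pvAux, List.zip_cons_cons, List.map_cons, ih, hsnd]

theorem pv_last (min_df : Int) (cats : List (List (Int × Int))) :
    ∀ (c : Int), (pvSums min_df cats c).getLastD c = (pvAux min_df cats c).2 := by
  induction cats with
  | nil => intro c; rfl
  | cons d ds ih =>
      intro c
      have hsnd : (pvRebuild min_df d c).2
          = d.foldl (fun s kv => if min_df ≤ kv.2 then s + 1 else s) c :=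
        pv_rebuild_snd min_df d [] c
      simp only [pvSums, pvAux, List.getLastD_cons, ih, hsnd]

-- ===== VERDICT (by name: the statement is the Claim_ definition above) =====
theorem adjust_index_spec : Claim_equal_adjust_index := by
  intro categories min_df _ hpre
  show adjust_index categories min_df = adjust_index_alt categories min_df
  have hA := pv_outer min_df categories [] 24 hpre
  simp only [List.length_nil, Nat.cast_zero, List.nil_append] at hA
  rw [adjust_index_as_enumerate, hA]
  show _ = adjust_index_alt categories min_df
  simp only [adjust_index_alt]
  rw [show ([24] : List Int) = [] ++ [24] from rfl, pv_offs]
  simp only [List.nil_append, pv_zipmap, List.getLastD_cons, pv_last]
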